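-- pv_equiv track=rewrite | github.com/GoodGuy4221/pg | services.py | character_count_converter_2
-- ===== SOURCE A (Python) =====
-- def character_count_converter_2(string: str) -> str:
--     if not isinstance(string, str):
--         raise ValueError('Получена не строка!')
--     count_chars = {}
--     for char in string:
--         if char in count_chars:
--             count_chars[char] += 1
--         else:
--             count_chars[char] = 1
--     return ''.join(f'{k}{v}' for k, v in count_chars.items())
-- ===== SOURCE B (Python) =====
-- def character_count_converter_2(string: str) -> str:
--     if not isinstance(string, str):
--         raise ValueError('Получена не строка!')
--     seen = set()
--     parts = []
--     for char in string:
--         if char not in seen: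
--             seen.add(char)
--             parts.append(f'{char}{string.count(char)}')
--     return ''.join(parts)
-- ===== Notes on version B (the rewrite author's own statement) =====
-- stated objective: alternative
-- what changed: Replaces the single-pass frequency dict with a dedup-and-rescan strategy: one pass keeps a seen-set and, on each first occurrence, obtains that character's count by rescanning the string with str.count.
import Mathlib
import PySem

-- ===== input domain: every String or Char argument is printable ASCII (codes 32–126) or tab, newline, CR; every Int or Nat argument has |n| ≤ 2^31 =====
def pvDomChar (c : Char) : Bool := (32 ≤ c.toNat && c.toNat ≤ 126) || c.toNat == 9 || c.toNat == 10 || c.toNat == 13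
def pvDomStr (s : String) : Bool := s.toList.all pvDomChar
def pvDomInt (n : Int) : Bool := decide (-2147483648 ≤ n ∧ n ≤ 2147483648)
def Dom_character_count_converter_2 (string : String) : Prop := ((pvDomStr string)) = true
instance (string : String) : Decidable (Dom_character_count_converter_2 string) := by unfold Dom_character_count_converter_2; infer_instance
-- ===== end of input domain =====

-- B replaces A's single-pass frequency dict by a seen-set with a per-distinct-character rescan
-- (str.count); same result, a genuinely different traversal (objective: alternative).

-- ===== PORT A =====
-- dict built with 'if char in d: d[char] += 1 else: d[char] = 1', then ''.join(f'{k}{v}')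
def character_count_converter_2 (string : String) : String :=
  let count_chars : PySem.Dict Char Int :=
    string.toList.foldl
      (fun d char =>
        if d.contains char then d.insert char (d.getD char 0 + 1)
        else d.insert char 1)
      PySem.Dict.empty
  PySem.Str.join "" (count_chars.items.map (fun kv => String.ofList (kv.1 :: PySem.Int.toChars kv.2)))

-- ===== PORT B =====
-- one pass with a seen set; on a first occurrence append f'{char}{string.count(char)}'; join at the end
def character_count_converter_2_alt (string : String) : String :=
  let res :=
    string.toList.foldl
      (fun (acc : PySem.Set Char × List String) char =>
        if PySem.Set.contains acc.1 char then acc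
        else (PySem.Set.add acc.1 char,
              acc.2 ++ [String.ofList (char :: PySem.Int.toChars ((PySem.Str.count string (String.ofList [char]) : Nat) : Int))]))
      (PySem.Set.empty, [])
  PySem.Str.join "" res.2

-- ===== PRECONDITION & SPEC =====
def Spec_character_count_converter_2 (string : String) (out : String) : Prop := out = character_count_converter_2_alt string
instance (string : String) (out : String) : Decidable (Spec_character_count_converter_2 string out) := by unfold Spec_character_count_converter_2; infer_instance

-- ===== CLAIM (what is proved, stated in full; the proofs are below) =====
def Claim_equal_character_count_converter_2 : Prop := ∀ (string : String), Dom_character_count_converter_2 string → Spec_character_count_converter_2 string (character_count_converter_2 string)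

-- ===== LEMMAS AND PROOFS =====

-- A's guarded counting loop is exactly the unguarded 'insert (getD + 1)' loop, hence Counter.
lemma foldA_eq_counter (l : List Char) :
    l.foldl
      (fun d char =>
        if d.contains char then d.insert char (d.getD char 0 + 1)
        else d.insert char 1)
      PySem.Dict.empty = PySem.Dict.counter l := by
  rw [← PySem.Dict.foldl_insert_getD_add_one_eq_counter]
  congr 1
  funext d c
  cases h : d.contains c with
  | true => simp
  | false => simp [PySem.Dict.getD_of_not_contains d 0 h]

-- B's seen-set loop emits f c once per distinct character, in first-occurrence order.
lemma seen_fold (f : Char → String) (l : List Char) :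
    l.foldl
      (fun (acc : PySem.Set Char × List String) c =>
        if PySem.Set.contains acc.1 c then acc else (PySem.Set.add acc.1 c, acc.2 ++ [f c]))
      (PySem.Set.empty, ([] : List String))
    = (PySem.Set.ofList l, (PySem.Set.ofList l).map f) := by
  induction l using List.reverseRecOn with
  | nil => rfl
  | append_singleton l c ih =>
    rw [List.foldl_append, ih, PySem.Set.ofList_append_singleton]
    by_cases h : c ∈ PySem.Set.ofList l
    · have hc : PySem.Set.contains (PySem.Set.ofList l) c = true := (PySem.Set.contains_iff _ _).mpr h
      have hl : c ∈ l := (PySem.Set.mem_ofList l c).mp h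
      simp [hl]
    · have hc : PySem.Set.contains (PySem.Set.ofList l) c = false := by
        rw [← Bool.not_eq_true]
        exact fun hh => h ((PySem.Set.contains_iff _ _).mp hh)
      have hl : c ∉ l := fun hl => h ((PySem.Set.mem_ofList l c).mpr hl)
      simp [hl]

-- str.count with a one-character needle is List.count.
lemma count_go_singleton (c : Char) :
    ∀ (l : List Char) (fuel acc : Nat), l.length ≤ fuel →
      PySem.Chars.count.go [c] fuel l acc = acc + l.count c := by
  intro l
  induction l with
  | nil => intro fuel acc _; cases fuel <;> simp [PySem.Chars.count.go]
  | cons h t ih =>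
    intro fuel acc hle
    cases fuel with
    | zero => simp at hle
    | succ f =>
      by_cases hc : c = h
      · subst hc
        simp only [PySem.Chars.count.go, List.isPrefixOf, beq_self_eq_true, Bool.true_and,
          if_true, List.length_singleton, List.drop_one, List.tail_cons]
        rw [ih f (acc + 1) (by simp only [List.length_cons] at hle; omega)]
        simp
        omega
      · have : List.isPrefixOf [c] (h :: t) = false := by
          simp [List.isPrefixOf]
          exact fun hb => hc (by simpa using hb)
        simp only [PySem.Chars.count.go, this]
        rw [ih f acc (by simp only [List.length_cons] at hle; omega)]
        simp [Ne.symm hc]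

lemma chars_count_singleton (l : List Char) (c : Char) :
    PySem.Chars.count l [c] = l.count c := by
  unfold PySem.Chars.count
  simp only [List.isEmpty_cons]
  simpa using count_go_singleton c l l.length 0 (le_refl _)

-- ===== VERDICT (by name: the statement is the Claim_ definition above) =====
theorem character_count_converter_2_spec : Claim_equal_character_count_converter_2 := by
  intro string _
  unfold Spec_character_count_converter_2 character_count_converter_2 character_count_converter_2_alt
  simp only [foldA_eq_counter, PySem.Dict.items_counter, seen_fold, List.map_map]
  apply congrArg
  apply List.map_congr_left
  intro c _
  simp [PySem.Str.count, chars_count_singleton]
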